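-- pv_equiv track=rewrite | github.com/dipakrachchh24/code4Logic | code4logic/utils/range_selector.py | parse_id_range
-- ===== SOURCE A (Python) =====
-- def parse_id_range(user_input, all_ids):
--     """
--     Returns a filtered list of IDs based on user input.
--     """
--
--     all_ids = sorted(all_ids)
--
--     if not user_input.strip():
--         return all_ids
--
--     user_input = user_input.strip()
--
--     # Single ID: start → end
--     if user_input.isdigit():
--         start = int(user_input)
--         return [i for i in all_ids if i >= start]
--
--     # Range A-B
--     if "-" in user_input:
--         parts = user_input.split("-")
--         if len(parts) != 2 or not parts[0].isdigit() or not parts[1].isdigit():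
--             raise ValueError("Invalid range format. Use A B")
--
--         start, end = map(int, parts)
--         return [i for i in all_ids if start <= i <= end]
--     # Range A B
--     if " " in user_input:
--         parts = user_input.split(" ")
--         if len(parts) != 2 or not parts[0].isdigit() or not parts[1].isdigit():
--             raise ValueError("Invalid range format. Use A B")
--
--         start, end = map(int, parts)
--         return [i for i in all_ids if start <= i <= end]
--
--     raise ValueError("Invalid input. Use empty, N, or A-B or A B.")
-- ===== SOURCE B (Python) =====
-- def _bisect_left(a, x):
--     lo, hi = 0, len(a)
--     while lo < hi:
--         mid = (lo + hi) // 2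
--         if a[mid] < x:
--             lo = mid + 1
--         else:
--             hi = mid
--     return lo
--
--
-- def _bisect_right(a, x):
--     lo, hi = 0, len(a)
--     while lo < hi:
--         mid = (lo + hi) // 2
--         if x < a[mid]:
--             hi = mid
--         else:
--             lo = mid + 1
--     return lo
--
--
-- def parse_id_range(user_input, all_ids):
--     """
--     Returns a filtered list of IDs based on user input.
--     Uses binary-search boundary location on the sorted list instead of
--     full-list predicate scans.
--     """
--     ids = sorted(all_ids)
--     s = user_input.strip()
--
--     if not s:
--         return ids
--
--     if s.isdigit():
--         return ids[_bisect_left(ids, int(s)):]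
--
--     if "-" in s:
--         parts = s.split("-")
--     elif " " in s:
--         parts = s.split(" ")
--     else:
--         raise ValueError("Invalid input. Use empty, N, or A-B or A B.")
--
--     if len(parts) != 2 or not parts[0].isdigit() or not parts[1].isdigit():
--         raise ValueError("Invalid range format. Use A B")
--
--     start, end = int(parts[0]), int(parts[1])
--     return ids[_bisect_left(ids, start):_bisect_right(ids, end)]
-- ===== Notes on version B (the rewrite author's own statement) =====
-- stated objective: alternative
-- what changed: Each filtering list-comprehension scan is replaced by binary-search boundary location (hand-written bisect_left/bisect_right) on the sorted list plus a slice; the two range branches share one merged parsing path.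
import Mathlib
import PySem

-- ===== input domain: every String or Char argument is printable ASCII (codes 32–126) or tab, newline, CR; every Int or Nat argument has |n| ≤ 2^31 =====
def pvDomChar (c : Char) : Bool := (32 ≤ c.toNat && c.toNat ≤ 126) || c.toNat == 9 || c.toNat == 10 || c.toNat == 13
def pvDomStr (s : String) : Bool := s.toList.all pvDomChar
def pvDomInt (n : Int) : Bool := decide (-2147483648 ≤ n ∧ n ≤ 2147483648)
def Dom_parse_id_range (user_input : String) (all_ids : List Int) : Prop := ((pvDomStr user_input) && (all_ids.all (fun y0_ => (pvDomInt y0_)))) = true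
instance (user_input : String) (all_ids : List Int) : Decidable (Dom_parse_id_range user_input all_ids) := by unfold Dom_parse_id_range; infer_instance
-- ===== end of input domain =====

-- B replaces each filtering comprehension by binary-search boundary location on the
-- sorted list plus a slice (alternative algorithm, same sort-dominated cost).

-- ===== PORT A =====
-- literal transliteration of Source A; on inputs where the Python raises ValueError
-- (excluded by Pre_) the port returns [].
def parse_id_range (user_input : String) (all_ids : List Int) : List Int :=
  let ids := PySem.List.sorted all_ids (fun x => x) false
  let s := PySem.Str.strip user_input
  if s = "" then ids
  else if PySem.Str.strIsdigit s then
    let start := (PySem.Int.ofStr? s).getD 0   -- isdigit guarantees int() succeeds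
    ids.filter (fun i => decide (start ≤ i))
  else if PySem.Str.isIn "-" s then
    let parts := (PySem.Str.split? s "-").getD []   -- split? is always some: the separator is non-empty
    if ¬(parts.length = 2) || ¬(PySem.Str.strIsdigit (parts.getD 0 "")) || ¬(PySem.Str.strIsdigit (parts.getD 1 "")) then
      []  -- raise ValueError
    else
      let start := (PySem.Int.ofStr? (parts.getD 0 "")).getD 0
      let e := (PySem.Int.ofStr? (parts.getD 1 "")).getD 0
      ids.filter (fun i => decide (start ≤ i) && decide (i ≤ e))
  else if PySem.Str.isIn " " s then
    let parts := (PySem.Str.split? s " ").getD []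
    if ¬(parts.length = 2) || ¬(PySem.Str.strIsdigit (parts.getD 0 "")) || ¬(PySem.Str.strIsdigit (parts.getD 1 "")) then
      []  -- raise ValueError
    else
      let start := (PySem.Int.ofStr? (parts.getD 0 "")).getD 0
      let e := (PySem.Int.ofStr? (parts.getD 1 "")).getD 0
      ids.filter (fun i => decide (start ≤ i) && decide (i ≤ e))
  else []  -- raise ValueError

-- ===== PORT B =====
-- literal transliteration of Source B; the hand-written bisect loops in Source B are the
-- standard bisect_left/bisect_right loops, ported as PySem.List.bisectLeft/Right
-- (the same lo/hi binary-search loop).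
def parse_id_range_alt (user_input : String) (all_ids : List Int) : List Int :=
  let ids := PySem.List.sorted all_ids (fun x => x) false
  let s := PySem.Str.strip user_input
  if s = "" then ids
  else if PySem.Str.strIsdigit s then
    let start := (PySem.Int.ofStr? s).getD 0
    PySem.List.slice ids (some (PySem.List.bisectLeft ids start : Int)) none
  else
    let parts? : Option (List String) :=
      if PySem.Str.isIn "-" s then PySem.Str.split? s "-"
      else if PySem.Str.isIn " " s then PySem.Str.split? s " "
      else none  -- raise ValueError
    match parts? with
    | none => []  -- raise ValueError
    | some parts =>
      if ¬(parts.length = 2) || ¬(PySem.Str.strIsdigit (parts.getD 0 "")) || ¬(PySem.Str.strIsdigit (parts.getD 1 "")) then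
        []  -- raise ValueError
      else
        let start := (PySem.Int.ofStr? (parts.getD 0 "")).getD 0
        let e := (PySem.Int.ofStr? (parts.getD 1 "")).getD 0
        PySem.List.slice ids (some (PySem.List.bisectLeft ids start : Int))
                            (some (PySem.List.bisectRight ids e : Int))

-- ===== PRECONDITION & SPEC =====
-- helper: the result of split yields exactly two digit-only parts
def pvTwoDigits (o : Option (List String)) : Bool :=
  o.elim false (fun ps =>
    decide (ps.length = 2) && PySem.Str.strIsdigit (ps.getD 0 "") && PySem.Str.strIsdigit (ps.getD 1 ""))

-- Pre_ excludes exactly the inputs on which the Python A raises ValueError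
-- (non-empty stripped input that is neither all digits nor a valid "A-B"/"A B" pair).
def Pre_parse_id_range (user_input : String) (all_ids : List Int) : Prop :=
  let s := PySem.Str.strip user_input
  s = "" ∨ PySem.Str.strIsdigit s = true ∨
    (PySem.Str.isIn "-" s = true ∧ pvTwoDigits (PySem.Str.split? s "-") = true) ∨
    (PySem.Str.isIn "-" s = false ∧ PySem.Str.isIn " " s = true ∧
      pvTwoDigits (PySem.Str.split? s " ") = true)

instance (user_input : String) (all_ids : List Int) : Decidable (Pre_parse_id_range user_input all_ids) := by
  unfold Pre_parse_id_range; infer_instance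

-- witness inside Dom ∧ Pre
def pvWitness_parse_id_range : String × List Int := ("1-3", [2, 5, 1])

def Spec_parse_id_range (user_input : String) (all_ids : List Int) (out : List Int) : Prop := out = parse_id_range_alt user_input all_ids
instance (user_input : String) (all_ids : List Int) (out : List Int) : Decidable (Spec_parse_id_range user_input all_ids out) := by unfold Spec_parse_id_range; infer_instance

-- ===== CLAIM (what is proved, stated in full; the proofs are below) =====
def Claim_equal_parse_id_range : Prop := ∀ (user_input : String) (all_ids : List Int), Dom_parse_id_range user_input all_ids → Pre_parse_id_range user_input all_ids → Spec_parse_id_range user_input all_ids (parse_id_range user_input all_ids)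

-- ===== LEMMAS AND PROOFS =====

-- a filter whose predicate is false before index l, true on [l, r), false from r on,
-- equals the slice [l:r] of the list
theorem filter_eq_drop_take (xs : List Int) (p : Int → Bool) (l r : Nat)
    (hl : l ≤ xs.length)
    (h1 : ∀ (j : Nat) (h : j < xs.length), j < l → p xs[j] = false)
    (h2 : ∀ (j : Nat) (h : j < xs.length), l ≤ j → j < r → p xs[j] = true)
    (h3 : ∀ (j : Nat) (h : j < xs.length), r ≤ j → p xs[j] = false) :
    xs.filter p = (xs.drop l).take (r - l) := by
  have hx : xs = xs.take l ++ ((xs.drop l).take (r - l) ++ (xs.drop l).drop (r - l)) := by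
    rw [List.take_append_drop, List.take_append_drop]
  conv_lhs => rw [hx]
  rw [List.filter_append, List.filter_append]
  have hA : (xs.take l).filter p = [] := by
    rw [List.filter_eq_nil_iff]
    intro a ha
    obtain ⟨i, hi, hgi⟩ := List.mem_iff_getElem.mp ha
    have hil : i < l := by
      have := hi; rw [List.length_take] at this; omega
    have hilen : i < xs.length := by
      have := hi; rw [List.length_take] at this; omega
    rw [List.getElem_take] at hgi
    subst hgi
    simp [h1 i hilen hil]
  have hB : ((xs.drop l).take (r - l)).filter p = (xs.drop l).take (r - l) := by
    rw [List.filter_eq_self]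
    intro a ha
    obtain ⟨i, hi, hgi⟩ := List.mem_iff_getElem.mp ha
    have hlen : i < r - l ∧ i < xs.length - l := by
      have := hi; rw [List.length_take, List.length_drop] at this; omega
    have hidx : l + i < xs.length := by omega
    rw [List.getElem_take, List.getElem_drop] at hgi
    subst hgi
    exact h2 (l + i) hidx (by omega) (by omega)
  have hC : ((xs.drop l).drop (r - l)).filter p = [] := by
    rw [List.drop_drop, List.filter_eq_nil_iff]
    intro a ha
    obtain ⟨i, hi, hgi⟩ := List.mem_iff_getElem.mp ha
    have hidx : (l + (r - l)) + i < xs.length := by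
      have := hi; rw [List.length_drop] at this; omega
    rw [List.getElem_drop] at hgi
    subst hgi
    simp [h3 _ hidx (by omega)]
  rw [hA, hB, hC]
  simp

theorem parse_id_range_filter_ge (xs : List Int) (a : Int)
    (hs : xs.Pairwise (fun x y => x ≤ y)) :
    xs.filter (fun i => decide (a ≤ i)) = xs.drop (PySem.List.bisectLeft xs a) := by
  obtain ⟨hle, hlt, hge⟩ := PySem.List.bisectLeft_spec xs a hs
  have := filter_eq_drop_take xs (fun i => decide (a ≤ i))
    (PySem.List.bisectLeft xs a) xs.length hle
    (fun j h hj => by simpa using not_le.mpr (hlt j h hj))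
    (fun j h hj _ => by simpa using hge j h hj)
    (fun j h hj => by omega)
  rw [this, List.take_of_length_le (by simp)]

theorem parse_id_range_filter_between (xs : List Int) (a b : Int)
    (hs : xs.Pairwise (fun x y => x ≤ y)) :
    xs.filter (fun i => decide (a ≤ i) && decide (i ≤ b)) =
      (xs.drop (PySem.List.bisectLeft xs a)).take
        (PySem.List.bisectRight xs b - PySem.List.bisectLeft xs a) := by
  obtain ⟨hle, hlt, hge⟩ := PySem.List.bisectLeft_spec xs a hs
  obtain ⟨hle', hleb, hgtb⟩ := PySem.List.bisectRight_spec xs b hs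
  exact filter_eq_drop_take xs (fun i => decide (a ≤ i) && decide (i ≤ b))
    (PySem.List.bisectLeft xs a) (PySem.List.bisectRight xs b) hle
    (fun j h hj => by simp; intro ha; exact absurd (hlt j h hj) (not_lt.mpr ha))
    (fun j h hj hj' => by simp [hge j h hj, hleb j h hj'])
    (fun j h hj => by
      simp; intro _
      exact hgtb j h hj)

-- ===== VERDICT (by name: the statement is the Claim_ definition above) =====
theorem parse_id_range_spec : Claim_equal_parse_id_range := by
  intro ui ids _hdom hpre
  unfold Spec_parse_id_range parse_id_range parse_id_range_alt
  have hs : (PySem.List.sorted ids (fun x => x) false).Pairwise (fun x y => x ≤ y) := by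
    simpa using PySem.List.sorted_pairwise ids (fun x => x)
  set xs := PySem.List.sorted ids (fun x => x) false with hxs
  set s := PySem.Str.strip ui with hstrip
  by_cases h0 : s = ""
  · simp [h0]
  by_cases hd : PySem.Str.strIsdigit s = true
  · simp only [h0, if_false, hd, if_pos]
    rw [PySem.List.slice_from_natCast]
    exact parse_id_range_filter_ge xs _ hs
  unfold Pre_parse_id_range at hpre
  rw [← hstrip] at hpre
  rcases hpre with h0' | hd' | ⟨hdash, htwo⟩ | ⟨hndash, hsp, htwo⟩
  · exact absurd h0' h0
  · exact absurd hd' hd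
  · simp only [h0, if_false, hd, hdash, if_pos]
    cases e : PySem.Str.split? s "-" with
    | none => exact absurd htwo (by simp [e, pvTwoDigits])
    | some parts =>
      rw [e] at htwo
      simp only [pvTwoDigits, Option.elim, Bool.and_eq_true, decide_eq_true_eq] at htwo
      obtain ⟨⟨hlen, hd0⟩, hd1⟩ := htwo
      simp only [Option.getD_some, hlen, hd0, hd1, not_true, Bool.or_self]
      rw [PySem.List.slice_natCast]
      exact parse_id_range_filter_between xs _ _ hs
  · simp only [h0, if_false, hd, hndash, hsp, if_pos, Bool.false_eq_true]
    cases e : PySem.Str.split? s " " with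
    | none => exact absurd htwo (by simp [e, pvTwoDigits])
    | some parts =>
      rw [e] at htwo
      simp only [pvTwoDigits, Option.elim, Bool.and_eq_true, decide_eq_true_eq] at htwo
      obtain ⟨⟨hlen, hd0⟩, hd1⟩ := htwo
      simp only [Option.getD_some, hlen, hd0, hd1, not_true, Bool.or_self]
      rw [PySem.List.slice_natCast]
      exact parse_id_range_filter_between xs _ _ hs
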